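-- pv_equiv track=rewrite | github.com/yxwCS/seapipy | seapipy/create_lattice_3d.py | generate_edges_and_faces_from_vertices_v2
-- ===== SOURCE A (Python) =====
-- def generate_edges_and_faces_from_vertices_v2(faces_dict):
--     edges = {}
--     edge_map = {}
--     edge_num = 1
--     edge_faces = {}
--
--     for index, face in faces_dict.items():
--         edge_face = []
--         for ii in range(len(face)):
--             v0 = face[ii]
--             v1 = face[(ii + 1) % len(face)]
--             edge = (v0, v1) if v0 < v1 else (v1, v0)
--             if edge not in edge_map:
--                 edges[edge_num] = edge
--                 edge_map[edge] = edge_num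
--                 edge_map[(edge[1], edge[0])] = -edge_num
--                 edge_num += 1
--             edge_face.append(edge_map[(v0, v1)])
--         edge_faces[index] = edge_face
--     return edges, edge_faces
-- ===== SOURCE B (Python) =====
-- def _canon(v0, v1):
--     return (v0, v1) if v0 < v1 else (v1, v0)
--
--
-- def _pairs(face):
--     return list(zip(face, face[1:] + face[:1]))
--
--
-- def _signed(edge_map, v0, v1):
--     n = edge_map[_canon(v0, v1)]
--     return n if v0 < v1 else -n
--
--
-- def generate_edges_and_faces_from_vertices_v2(faces_dict):
--     # pass 1: number the canonical (min, max) edges in discovery order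
--     edge_map = {}
--     edges = {}
--     for face in faces_dict.values():
--         for v0, v1 in _pairs(face):
--             c = _canon(v0, v1)
--             if c not in edge_map:
--                 edge_map[c] = len(edge_map) + 1
--                 edges[len(edge_map)] = c
--     # pass 2: label each face, computing the orientation sign on the fly
--     edge_faces = {index: [_signed(edge_map, v0, v1) for v0, v1 in _pairs(face)]
--                   for index, face in faces_dict.items()}
--     return edges, edge_faces
-- ===== Notes on version B (the rewrite author's own statement) =====
-- stated objective: alternative
-- what changed: A interleaves edge numbering and face labeling in one loop and stores an extra reversed (-n) entry per edge in edge_map; B makes two separate passes - first numbering only the canonical (min,max) edges by discovery order, then labeling each face by zipping it with its rotation and computing the orientation sign on the fly - so the reversed map entries disappear.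
import Mathlib
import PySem

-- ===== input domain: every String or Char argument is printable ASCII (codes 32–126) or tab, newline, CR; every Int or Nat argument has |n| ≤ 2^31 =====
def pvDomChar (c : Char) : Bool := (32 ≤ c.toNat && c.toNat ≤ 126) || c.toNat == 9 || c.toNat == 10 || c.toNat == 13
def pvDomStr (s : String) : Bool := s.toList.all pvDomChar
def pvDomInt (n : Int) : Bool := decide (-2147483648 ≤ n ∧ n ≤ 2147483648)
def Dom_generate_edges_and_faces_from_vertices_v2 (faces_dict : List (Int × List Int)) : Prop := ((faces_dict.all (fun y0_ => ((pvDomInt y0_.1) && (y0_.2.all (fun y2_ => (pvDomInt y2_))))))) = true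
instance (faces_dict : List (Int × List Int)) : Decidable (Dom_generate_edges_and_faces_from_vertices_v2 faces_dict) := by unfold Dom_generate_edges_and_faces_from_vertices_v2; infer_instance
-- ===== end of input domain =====

-- B re-decomposes A's single interleaved loop into two shaped passes (number the
-- canonical edges first, then label the faces computing the sign on the fly);
-- objective: simpler (no stored reverse -n entries). Equivalence is unconditional.

-- ===== PORT A =====
-- the body of A's inner `for ii in range(len(face))` loop
def pvAStep (face : List Int)
    (st : PySem.Dict Int (Int × Int) × PySem.Dict (Int × Int) Int × Int × List Int)
    (ii : Int) :
    PySem.Dict Int (Int × Int) × PySem.Dict (Int × Int) Int × Int × List Int :=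
  let (edges, edge_map, edge_num, edge_face) := st
  let v0 := PySem.List.pyGetD face ii 0
  let v1 := PySem.List.pyGetD face (PySem.Int.mod (ii + 1) (face.length : Int)) 0
  let edge := if v0 < v1 then (v0, v1) else (v1, v0)
  let (edges, edge_map, edge_num) :=
    if edge_map.contains edge = false then
      (edges.insert edge_num edge,
       (edge_map.insert edge edge_num).insert (edge.2, edge.1) (-edge_num),
       edge_num + 1)
    else (edges, edge_map, edge_num)
  (edges, edge_map, edge_num, edge_face ++ [edge_map.getD (v0, v1) 0])

-- the body of A's outer `for index, face in faces_dict.items()` loop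
def pvAFace
    (st : PySem.Dict Int (Int × Int) × PySem.Dict (Int × Int) Int × Int × PySem.Dict Int (List Int))
    (q : Int × List Int) :
    PySem.Dict Int (Int × Int) × PySem.Dict (Int × Int) Int × Int × PySem.Dict Int (List Int) :=
  let r := (PySem.List.pyRange 0 (q.2.length : Int) 1).foldl (pvAStep q.2)
      (st.1, st.2.1, st.2.2.1, ([] : List Int))
  (r.1, r.2.1, r.2.2.1, st.2.2.2.insert q.1 r.2.2.2)

def generate_edges_and_faces_from_vertices_v2 (faces_dict : List (Int × List Int)) :
    (List (Int × Int × Int)) × (List (Int × List Int)) :=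
  let st := faces_dict.foldl pvAFace
      ((PySem.Dict.empty : PySem.Dict Int (Int × Int)),
       (PySem.Dict.empty : PySem.Dict (Int × Int) Int), (1 : Int),
       (PySem.Dict.empty : PySem.Dict Int (List Int)))
  (st.1.items, st.2.2.2.items)

-- ===== PORT B =====
def pvCanon (v0 v1 : Int) : Int × Int := if v0 < v1 then (v0, v1) else (v1, v0)

-- list(zip(face, face[1:] + face[:1]))
def pvPairs (face : List Int) : List (Int × Int) := face.zip (face.drop 1 ++ face.take 1)

-- pass-1 body: register a canonical edge if unseen
def pvReg (st : PySem.Dict (Int × Int) Int × PySem.Dict Int (Int × Int)) (p : Int × Int) :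
    PySem.Dict (Int × Int) Int × PySem.Dict Int (Int × Int) :=
  let c := pvCanon p.1 p.2
  if st.1.contains c then st
  else
    let n : Int := (st.1.size : Int) + 1
    (st.1.insert c n, st.2.insert n c)

def pvSigned (edge_map : PySem.Dict (Int × Int) Int) (p : Int × Int) : Int :=
  let n := edge_map.getD (pvCanon p.1 p.2) 0
  if p.1 < p.2 then n else -n

def generate_edges_and_faces_from_vertices_v2_alt (faces_dict : List (Int × List Int)) :
    (List (Int × Int × Int)) × (List (Int × List Int)) :=
  let st := faces_dict.foldl (fun st q => (pvPairs q.2).foldl pvReg st)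
      ((PySem.Dict.empty : PySem.Dict (Int × Int) Int),
       (PySem.Dict.empty : PySem.Dict Int (Int × Int)))
  let edge_faces := faces_dict.foldl
      (fun d q => d.insert q.1 ((pvPairs q.2).map (pvSigned st.1)))
      (PySem.Dict.empty : PySem.Dict Int (List Int))
  (st.2.items, edge_faces.items)

-- ===== PRECONDITION & SPEC =====
def Spec_generate_edges_and_faces_from_vertices_v2 (faces_dict : List (Int × List Int)) (out : (List (Int × Int × Int)) × (List (Int × List Int))) : Prop := out = generate_edges_and_faces_from_vertices_v2_alt faces_dict
instance (faces_dict : List (Int × List Int)) (out : (List (Int × Int × Int)) × (List (Int × List Int))) : Decidable (Spec_generate_edges_and_faces_from_vertices_v2 faces_dict out) := by unfold Spec_generate_edges_and_faces_from_vertices_v2; infer_instance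

-- ===== CLAIM (what is proved, stated in full; the proofs are below) =====
def Claim_equal_generate_edges_and_faces_from_vertices_v2 : Prop := ∀ (faces_dict : List (Int × List Int)), Dom_generate_edges_and_faces_from_vertices_v2 faces_dict → Spec_generate_edges_and_faces_from_vertices_v2 faces_dict (generate_edges_and_faces_from_vertices_v2 faces_dict)

-- ===== LEMMAS AND PROOFS =====

-- pair-indexed version of A's inner-loop body (proof device)
def pvAStepP (st : PySem.Dict Int (Int × Int) × PySem.Dict (Int × Int) Int × Int × List Int)
    (p : Int × Int) :
    PySem.Dict Int (Int × Int) × PySem.Dict (Int × Int) Int × Int × List Int :=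
  let (edges, edge_map, edge_num, edge_face) := st
  let edge := if p.1 < p.2 then (p.1, p.2) else (p.2, p.1)
  let (edges, edge_map, edge_num) :=
    if edge_map.contains edge = false then
      (edges.insert edge_num edge,
       (edge_map.insert edge edge_num).insert (edge.2, edge.1) (-edge_num),
       edge_num + 1)
    else (edges, edge_map, edge_num)
  (edges, edge_map, edge_num, edge_face ++ [edge_map.getD (p.1, p.2) 0])

-- the sequence of (v0, v1) pairs A's index loop reads is exactly pvPairs
lemma pvPairs_eq_range (face : List Int) :
    (PySem.List.pyRange 0 (face.length : Int) 1).map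
      (fun ii => (PySem.List.pyGetD face ii 0,
                  PySem.List.pyGetD face (PySem.Int.mod (ii + 1) (face.length : Int)) 0))
      = pvPairs face := by
  rw [PySem.List.pyRange_zero_nat, List.map_map]
  apply List.ext_getElem
  · simp [pvPairs]; omega
  · intro i h1 h2
    simp only [List.getElem_map, List.getElem_range, Function.comp_apply]
    have hi : i < face.length := by simpa using h1
    have hcast : ((i : Int) + 1) = ((i + 1 : Nat) : Int) := by push_cast; ring
    rw [hcast, PySem.Int.mod_natCast]
    simp only [PySem.List.pyGetD_natCast]
    simp only [pvPairs]
    rw [List.getElem_zip, Prod.mk.injEq]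
    refine ⟨?_, ?_⟩
    · exact List.getD_eq_getElem face 0 hi
    · rw [List.getD_eq_getElem face 0 (by have := Nat.mod_lt (i + 1) (y := face.length) (by omega); omega)]
      by_cases hlast : i + 1 < face.length
      · have hmod : (i + 1) % face.length = i + 1 := Nat.mod_eq_of_lt hlast
        have hil : i < (face.drop 1).length := by simp; omega
        rw [List.getElem_append_left hil, List.getElem_drop]
        simp [hmod, Nat.add_comm]
      · have hieq : i + 1 = face.length := by omega
        have hmod : (i + 1) % face.length = 0 := by rw [hieq]; exact Nat.mod_self _
        have hge : (face.drop 1).length ≤ i := by simp; omega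
        rw [List.getElem_append_right hge]
        have hz : i - (face.length - 1) = 0 := by omega
        simp [hmod, List.getElem_take, hz]

lemma pvAStep_eq_pairs (face : List Int)
    (st : PySem.Dict Int (Int × Int) × PySem.Dict (Int × Int) Int × Int × List Int) :
    (PySem.List.pyRange 0 (face.length : Int) 1).foldl (pvAStep face) st
      = (pvPairs face).foldl pvAStepP st := by
  have hf : (fun (s : PySem.Dict Int (Int × Int) × PySem.Dict (Int × Int) Int × Int × List Int)
      (ii : Int) => pvAStepP s (PySem.List.pyGetD face ii 0,
        PySem.List.pyGetD face (PySem.Int.mod (ii + 1) (face.length : Int)) 0)) = pvAStep face := by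
    funext s ii
    obtain ⟨e, m, n, f⟩ := s
    rfl
  rw [← pvPairs_eq_range, List.foldl_map, hf]

-- the simulation invariant between A's state and B's pass-1 state
def pvInv (edges : PySem.Dict Int (Int × Int)) (mA : PySem.Dict (Int × Int) Int) (num : Int)
    (stB : PySem.Dict (Int × Int) Int × PySem.Dict Int (Int × Int)) : Prop :=
  edges = stB.2 ∧
  (∀ a b : Int, mA.get? (a, b) =
      if a < b then stB.1.get? (a, b) else (stB.1.get? (b, a)).map (fun n => -n)) ∧
  num = (stB.1.size : Int) + 1

-- inserting one fresh canonical edge (both directions on the A side) preserves the map invariant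
lemma pvInvM_insert (mA mB : PySem.Dict (Int × Int) Int) (num : Int) (x y : Int) (hxy : x ≤ y)
    (hM : ∀ a b : Int, mA.get? (a, b) =
        if a < b then mB.get? (a, b) else (mB.get? (b, a)).map (fun n => -n)) :
    ∀ a b : Int, ((mA.insert (x, y) num).insert (y, x) (-num)).get? (a, b) =
      if a < b then (mB.insert (x, y) num).get? (a, b)
      else ((mB.insert (x, y) num).get? (b, a)).map (fun n => -n) := by
  intro a b
  have h1 := hM a b
  by_cases hyx : ((a, b) : Int × Int) = (y, x)
  · have hab2 : a = y ∧ b = x := by rwa [Prod.mk.injEq] at hyx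
    obtain ⟨ha, hb⟩ := hab2
    have hnab : ¬ a < b := by omega
    have hba : ((b, a) : Int × Int) = (x, y) := by rw [Prod.mk.injEq]; exact ⟨hb, ha⟩
    rw [if_neg hnab, PySem.Dict.get?_insert, if_pos hyx, PySem.Dict.get?_insert, if_pos hba]
    simp
  · by_cases hcab : ((a, b) : Int × Int) = (x, y)
    · have hab2 : a = x ∧ b = y := by rwa [Prod.mk.injEq] at hcab
      obtain ⟨ha, hb⟩ := hab2
      have hxlty : x < y := by
        rcases eq_or_lt_of_le hxy with heq | h
        · exact absurd (by rw [Prod.mk.injEq]; constructor <;> omega) hyx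
        · exact h
      have hab : a < b := by omega
      rw [if_pos hab, PySem.Dict.get?_insert, if_neg hyx, PySem.Dict.get?_insert, if_pos hcab,
        PySem.Dict.get?_insert, if_pos hcab]
    · by_cases hab : a < b
      · rw [if_pos hab] at h1
        rw [if_pos hab, PySem.Dict.get?_insert, if_neg hyx, PySem.Dict.get?_insert, if_neg hcab,
          PySem.Dict.get?_insert, if_neg hcab]
        exact h1
      · have hba : ((b, a) : Int × Int) ≠ (x, y) := by
          intro hh
          rw [Prod.mk.injEq] at hh
          exact hyx (by rw [Prod.mk.injEq]; exact ⟨hh.2, hh.1⟩)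
        rw [if_neg hab] at h1
        rw [if_neg hab, PySem.Dict.get?_insert, if_neg hyx, PySem.Dict.get?_insert, if_neg hcab,
          PySem.Dict.get?_insert, if_neg hba]
        exact h1

-- one pair: A's step simulates B's register step and appends the signed number
lemma pvStep_sim (edges : PySem.Dict Int (Int × Int)) (mA : PySem.Dict (Int × Int) Int)
    (num : Int) (ef : List Int)
    (stB : PySem.Dict (Int × Int) Int × PySem.Dict Int (Int × Int)) (p : Int × Int)
    (h : pvInv edges mA num stB) :
    pvInv (pvAStepP (edges, mA, num, ef) p).1 (pvAStepP (edges, mA, num, ef) p).2.1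
        (pvAStepP (edges, mA, num, ef) p).2.2.1 (pvReg stB p) ∧
    (pvAStepP (edges, mA, num, ef) p).2.2.2 = ef ++ [pvSigned (pvReg stB p).1 p] ∧
    ((pvReg stB p).1.get? (pvCanon p.1 p.2)).isSome := by
  obtain ⟨hE, hM, hN⟩ := h
  obtain ⟨v0, v1⟩ := p
  obtain ⟨mB, eB⟩ := stB
  dsimp only at hE hM hN ⊢
  by_cases hlt : v0 < v1
  · -- canonical edge is (v0, v1)
    have hcont : mA.contains (v0, v1) = mB.contains (v0, v1) := by
      rw [PySem.Dict.contains_eq_isSome_get?, PySem.Dict.contains_eq_isSome_get?, hM v0 v1,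
        if_pos hlt]
    by_cases hmem : mB.contains (v0, v1) = true
    · have hmemS : (mB.get? (v0, v1)).isSome := by
        rw [← PySem.Dict.contains_eq_isSome_get?]; exact hmem
      obtain ⟨n, hn⟩ := Option.isSome_iff_exists.mp hmemS
      have hxA : pvAStepP (edges, mA, num, ef) (v0, v1)
          = (edges, mA, num, ef ++ [mA.getD (v0, v1) 0]) := by
        simp [pvAStepP, hlt, hcont, hmem]
      have hxB : pvReg (mB, eB) (v0, v1) = (mB, eB) := by
        simp [pvReg, pvCanon, hlt, hmem]
      have hval : mA.getD (v0, v1) 0 = pvSigned mB (v0, v1) := by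
        simp [pvSigned, pvCanon, hlt, PySem.Dict.getD_eq_get?_getD, hM v0 v1, hn]
      refine ⟨?_, ?_, ?_⟩
      · rw [hxA, hxB]; exact ⟨hE, hM, hN⟩
      · rw [hxA, hxB, hval]
      · rw [hxB]; simpa [pvCanon, hlt] using hmemS
    · simp only [Bool.not_eq_true] at hmem
      have hxA : pvAStepP (edges, mA, num, ef) (v0, v1) =
          (edges.insert num (v0, v1),
           (mA.insert (v0, v1) num).insert (v1, v0) (-num),
           num + 1,
           ef ++ [((mA.insert (v0, v1) num).insert (v1, v0) (-num)).getD (v0, v1) 0]) := by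
        simp [pvAStepP, hlt, hcont, hmem]
      have hnum : ((mB.size : Int) + 1) = num := hN.symm
      have hxB : pvReg (mB, eB) (v0, v1) = (mB.insert (v0, v1) num, eB.insert num (v0, v1)) := by
        simp [pvReg, pvCanon, hlt, hmem, hnum]
      have hM' := pvInvM_insert mA mB num v0 v1 (le_of_lt hlt) hM
      have hval : ((mA.insert (v0, v1) num).insert (v1, v0) (-num)).getD (v0, v1) 0
          = pvSigned (mB.insert (v0, v1) num) (v0, v1) := by
        have hh := hM' v0 v1
        rw [if_pos hlt] at hh
        simp [pvSigned, pvCanon, hlt, PySem.Dict.getD_eq_get?_getD, hh,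
          PySem.Dict.get?_insert_self]
      refine ⟨?_, ?_, ?_⟩
      · rw [hxA, hxB]
        refine ⟨by rw [hE], hM', ?_⟩
        dsimp only
        rw [PySem.Dict.size_insert, if_neg (by simp [hmem])]
        push_cast
        omega
      · rw [hxA, hxB, hval]
      · rw [hxB]; simp [pvCanon, hlt, PySem.Dict.get?_insert_self]
  · -- canonical edge is (v1, v0)
    have hxy : v1 ≤ v0 := by omega
    have hcont : mA.contains (v1, v0) = mB.contains (v1, v0) := by
      rw [PySem.Dict.contains_eq_isSome_get?, PySem.Dict.contains_eq_isSome_get?, hM v1 v0]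
      by_cases h2 : v1 < v0
      · rw [if_pos h2]
      · have hvv : v1 = v0 := by omega
        subst hvv
        rw [if_neg h2, Option.isSome_map]
    by_cases hmem : mB.contains (v1, v0) = true
    · have hmemS : (mB.get? (v1, v0)).isSome := by
        rw [← PySem.Dict.contains_eq_isSome_get?]; exact hmem
      obtain ⟨n, hn⟩ := Option.isSome_iff_exists.mp hmemS
      have hxA : pvAStepP (edges, mA, num, ef) (v0, v1)
          = (edges, mA, num, ef ++ [mA.getD (v0, v1) 0]) := by
        simp [pvAStepP, hlt, hcont, hmem]
      have hxB : pvReg (mB, eB) (v0, v1) = (mB, eB) := by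
        simp [pvReg, pvCanon, hlt, hmem]
      have hval : mA.getD (v0, v1) 0 = pvSigned mB (v0, v1) := by
        simp [pvSigned, pvCanon, hlt, PySem.Dict.getD_eq_get?_getD, hM v0 v1, hn]
      refine ⟨?_, ?_, ?_⟩
      · rw [hxA, hxB]; exact ⟨hE, hM, hN⟩
      · rw [hxA, hxB, hval]
      · rw [hxB]; simpa [pvCanon, hlt] using hmemS
    · simp only [Bool.not_eq_true] at hmem
      have hxA : pvAStepP (edges, mA, num, ef) (v0, v1) =
          (edges.insert num (v1, v0),
           (mA.insert (v1, v0) num).insert (v0, v1) (-num),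
           num + 1,
           ef ++ [((mA.insert (v1, v0) num).insert (v0, v1) (-num)).getD (v0, v1) 0]) := by
        simp [pvAStepP, hlt, hcont, hmem]
      have hnum : ((mB.size : Int) + 1) = num := hN.symm
      have hxB : pvReg (mB, eB) (v0, v1) = (mB.insert (v1, v0) num, eB.insert num (v1, v0)) := by
        simp [pvReg, pvCanon, hlt, hmem, hnum]
      have hM' := pvInvM_insert mA mB num v1 v0 hxy hM
      have hval : ((mA.insert (v1, v0) num).insert (v0, v1) (-num)).getD (v0, v1) 0
          = pvSigned (mB.insert (v1, v0) num) (v0, v1) := by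
        have hh := hM' v0 v1
        rw [if_neg hlt] at hh
        simp [pvSigned, pvCanon, hlt, PySem.Dict.getD_eq_get?_getD, hh,
          PySem.Dict.get?_insert_self]
      refine ⟨?_, ?_, ?_⟩
      · rw [hxA, hxB]
        refine ⟨by rw [hE], hM', ?_⟩
        dsimp only
        rw [PySem.Dict.size_insert, if_neg (by simp [hmem])]
        push_cast
        omega
      · rw [hxA, hxB, hval]
      · rw [hxB]; simp [pvCanon, hlt, PySem.Dict.get?_insert_self]

-- lookups already made never change during pass 1
lemma pvReg_get?_mono (st : PySem.Dict (Int × Int) Int × PySem.Dict Int (Int × Int))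
    (p : Int × Int) (k : Int × Int) (v : Int) (h : st.1.get? k = some v) :
    (pvReg st p).1.get? k = some v := by
  unfold pvReg
  by_cases hc : st.1.contains (pvCanon p.1 p.2)
  · simp only [hc, if_true]; exact h
  · have hk : k ≠ pvCanon p.1 p.2 := by
      rintro rfl
      rw [PySem.Dict.contains_eq_isSome_get?, h] at hc
      simp at hc
    simp only [hc, Bool.false_eq_true, if_false]
    rw [PySem.Dict.get?_insert, if_neg hk]
    exact h

lemma pvRegs_get?_mono (ps : List (Int × Int)) :
    ∀ (st : PySem.Dict (Int × Int) Int × PySem.Dict Int (Int × Int)) (k : Int × Int) (v : Int),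
      st.1.get? k = some v → ((ps.foldl pvReg st).1.get? k = some v) := by
  induction ps with
  | nil => intro st k v h; simpa using h
  | cons p ps ih => intro st k v h; exact ih _ _ _ (pvReg_get?_mono _ _ _ _ h)

lemma pvRegFaces_get?_mono (faces : List (Int × List Int)) :
    ∀ (st : PySem.Dict (Int × Int) Int × PySem.Dict Int (Int × Int)) (k : Int × Int) (v : Int),
      st.1.get? k = some v →
      ((faces.foldl (fun st q => (pvPairs q.2).foldl pvReg st) st).1.get? k = some v) := by
  induction faces with
  | nil => intro st k v h; simpa using h
  | cons q faces ih => intro st k v h; exact ih _ _ _ (pvRegs_get?_mono _ _ _ _ h)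

lemma pvSigned_congr (m m' : PySem.Dict (Int × Int) Int) (p : Int × Int)
    (hs : (m.get? (pvCanon p.1 p.2)).isSome)
    (hmono : ∀ k v, m.get? k = some v → m'.get? k = some v) :
    pvSigned m p = pvSigned m' p := by
  obtain ⟨v, hv⟩ := Option.isSome_iff_exists.mp hs
  unfold pvSigned
  rw [PySem.Dict.getD_eq_get?_getD, PySem.Dict.getD_eq_get?_getD, hv, hmono _ _ hv]

-- one face: A's inner loop simulates pass 1 on that face and produces the signed labels
lemma pvFace_sim (ps : List (Int × Int)) :
    ∀ (edges : PySem.Dict Int (Int × Int)) (mA : PySem.Dict (Int × Int) Int) (num : Int)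
      (ef : List Int) (stB : PySem.Dict (Int × Int) Int × PySem.Dict Int (Int × Int)),
      pvInv edges mA num stB →
      pvInv (ps.foldl pvAStepP (edges, mA, num, ef)).1
          (ps.foldl pvAStepP (edges, mA, num, ef)).2.1
          (ps.foldl pvAStepP (edges, mA, num, ef)).2.2.1 (ps.foldl pvReg stB) ∧
      (ps.foldl pvAStepP (edges, mA, num, ef)).2.2.2
          = ef ++ ps.map (pvSigned (ps.foldl pvReg stB).1) ∧
      (∀ p ∈ ps, ((ps.foldl pvReg stB).1.get? (pvCanon p.1 p.2)).isSome) := by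
  induction ps with
  | nil =>
    intro edges mA num ef stB h
    exact ⟨h, by simp, by simp⟩
  | cons p ps ih =>
    intro edges mA num ef stB h
    simp only [List.foldl_cons, List.map_cons]
    obtain ⟨h1, h2, h3⟩ := pvStep_sim edges mA num ef stB p h
    rcases hre : pvAStepP (edges, mA, num, ef) p with ⟨e1, m1, n1, f1⟩
    rw [hre] at h1 h2
    dsimp only at h1 h2
    obtain ⟨ihInv, ihEf, ihMem⟩ := ih e1 m1 n1 f1 (pvReg stB p) h1
    have hmono : ∀ k v, (pvReg stB p).1.get? k = some v →
        ((ps.foldl pvReg (pvReg stB p)).1.get? k = some v) := fun k v hv =>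
      pvRegs_get?_mono ps (pvReg stB p) k v hv
    obtain ⟨vv, hvv⟩ := Option.isSome_iff_exists.mp h3
    have hsg : pvSigned (pvReg stB p).1 p = pvSigned (ps.foldl pvReg (pvReg stB p)).1 p :=
      pvSigned_congr _ _ p h3 hmono
    refine ⟨ihInv, ?_, ?_⟩
    · rw [ihEf, h2, hsg, List.append_assoc, List.singleton_append]
    · intro qq hqq
      rcases List.mem_cons.mp hqq with rfl | hq2
      · exact Option.isSome_iff_exists.mpr ⟨vv, hmono _ _ hvv⟩
      · exact ihMem qq hq2

-- all faces: A's outer loop simulates pass 1 and builds exactly B's edge_faces dict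
lemma pvOuter_sim (faces : List (Int × List Int)) :
    ∀ (edges : PySem.Dict Int (Int × Int)) (mA : PySem.Dict (Int × Int) Int) (num : Int)
      (efd : PySem.Dict Int (List Int))
      (stB : PySem.Dict (Int × Int) Int × PySem.Dict Int (Int × Int)),
      pvInv edges mA num stB →
      pvInv (faces.foldl pvAFace (edges, mA, num, efd)).1
          (faces.foldl pvAFace (edges, mA, num, efd)).2.1
          (faces.foldl pvAFace (edges, mA, num, efd)).2.2.1
          (faces.foldl (fun st q => (pvPairs q.2).foldl pvReg st) stB) ∧
      (faces.foldl pvAFace (edges, mA, num, efd)).2.2.2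
          = faces.foldl (fun d q => d.insert q.1 ((pvPairs q.2).map
              (pvSigned (faces.foldl (fun st q => (pvPairs q.2).foldl pvReg st) stB).1))) efd := by
  induction faces with
  | nil =>
    intro edges mA num efd stB h
    exact ⟨h, rfl⟩
  | cons q faces ih =>
    intro edges mA num efd stB h
    simp only [List.foldl_cons]
    obtain ⟨fInv, fEf, fMem⟩ := pvFace_sim (pvPairs q.2) edges mA num [] stB h
    rcases hre : (pvPairs q.2).foldl pvAStepP (edges, mA, num, []) with ⟨e1, m1, n1, f1⟩
    rw [hre] at fInv fEf
    dsimp only at fInv fEf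
    rw [List.nil_append] at fEf
    have hface : pvAFace (edges, mA, num, efd) q = (e1, m1, n1, efd.insert q.1 f1) := by
      unfold pvAFace
      rw [pvAStep_eq_pairs, hre]
    have hmono : ∀ k v, ((pvPairs q.2).foldl pvReg stB).1.get? k = some v →
        ((faces.foldl (fun st q => (pvPairs q.2).foldl pvReg st)
            ((pvPairs q.2).foldl pvReg stB)).1.get? k = some v) := fun k v hv =>
      pvRegFaces_get?_mono faces ((pvPairs q.2).foldl pvReg stB) k v hv
    obtain ⟨oInv, oEf⟩ := ih e1 m1 n1 (efd.insert q.1 f1) ((pvPairs q.2).foldl pvReg stB) fInv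
    rw [hface]
    refine ⟨oInv, ?_⟩
    rw [oEf]
    congr 1
    rw [fEf]
    congr 1
    apply List.map_congr_left
    intro pp hp
    exact pvSigned_congr _ _ pp (fMem pp hp) (fun k v hv => hmono k v hv)

-- ===== VERDICT (by name: the statement is the Claim_ definition above) =====
theorem generate_edges_and_faces_from_vertices_v2_spec :
    Claim_equal_generate_edges_and_faces_from_vertices_v2 := by
  intro faces _hdom
  have hInit : pvInv (PySem.Dict.empty : PySem.Dict Int (Int × Int))
      (PySem.Dict.empty : PySem.Dict (Int × Int) Int) 1
      ((PySem.Dict.empty : PySem.Dict (Int × Int) Int),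
       (PySem.Dict.empty : PySem.Dict Int (Int × Int))) := by
    refine ⟨rfl, ?_, by simp [PySem.Dict.size_empty]⟩
    intro a b
    simp [PySem.Dict.get?_empty]
  obtain ⟨⟨hEdges, -, -⟩, hFaces⟩ := pvOuter_sim faces _ _ _ _ _ hInit
  unfold Spec_generate_edges_and_faces_from_vertices_v2
  unfold generate_edges_and_faces_from_vertices_v2 generate_edges_and_faces_from_vertices_v2_alt
  dsimp only
  rw [hEdges, hFaces]
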